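-- pv_equiv track=rewrite | github.com/sukhbinder/kon | src/kon/ui/autocomplete.py | should_trigger
-- ===== SOURCE A (Python) =====
-- def should_trigger(text: str, cursor_col: int) -> bool:
--     text_before = text[:cursor_col]
--     # Find @ that's at start or after whitespace
--     for i in range(len(text_before) - 1, -1, -1):
--         if text_before[i] == "@":
--             if i == 0 or text_before[i - 1].isspace():
--                 return True
--             break
--         elif text_before[i].isspace():
--             break
--     return False
-- ===== SOURCE B (Python) =====
-- def should_trigger(text: str, cursor_col: int) -> bool:
--     tb = text[:cursor_col]
--     if not tb or tb[-1].isspace():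
--         return False
--     word = tb.split()[-1]
--     return word[0] == "@" and "@" not in word[1:]
-- ===== Notes on version B (the rewrite author's own statement) =====
-- stated objective: simpler
-- what changed: Replaces A's fused backward character scan (with its look-back at text_before[i-1]) by guarding the empty/trailing-whitespace case, extracting the last whitespace-delimited token with split(), and checking that the token starts with '@' and contains no further '@'.
import Mathlib
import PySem

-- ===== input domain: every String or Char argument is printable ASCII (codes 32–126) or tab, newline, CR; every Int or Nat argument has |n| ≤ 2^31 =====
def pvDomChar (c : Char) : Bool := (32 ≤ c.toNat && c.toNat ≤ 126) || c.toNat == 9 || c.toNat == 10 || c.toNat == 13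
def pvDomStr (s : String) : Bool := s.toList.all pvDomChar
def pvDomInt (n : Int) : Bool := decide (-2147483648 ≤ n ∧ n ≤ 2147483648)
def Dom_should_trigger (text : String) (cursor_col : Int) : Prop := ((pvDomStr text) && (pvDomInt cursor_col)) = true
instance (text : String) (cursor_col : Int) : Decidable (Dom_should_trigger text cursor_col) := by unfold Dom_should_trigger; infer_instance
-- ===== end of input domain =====

-- B replaces A's fused backward character scan by a guard on the trailing character plus split()
-- and a check on the extracted last token (simpler decomposition, same cost; return value only).

-- ===== PORT A =====
-- 'for i in range(len(text_before)-1, -1, -1)': structural recursion on the index;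
-- fuel n means the next index examined is n-1; tb[i] is always in range here, so List.getD is exact.
def should_trigger.loop (tb : List Char) : Nat → Bool
  | 0 => false
  | i + 1 =>
    if tb.getD i ' ' = '@' then
      if i = 0 then true
      else if PySem.Chars.isspace (tb.getD (i - 1) ' ') then true
      else false                         -- break → return False
    else if PySem.Chars.isspace (tb.getD i ' ') then false   -- break → return False
    else should_trigger.loop tb i

def should_trigger (text : String) (cursor_col : Int) : Bool :=
  let tb := PySem.List.slice text.toList none (some cursor_col)
  should_trigger.loop tb tb.length

-- ===== PORT B =====
def should_trigger_alt (text : String) (cursor_col : Int) : Bool :=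
  let tb := PySem.List.slice text.toList none (some cursor_col)
  if tb = [] then false                  -- 'not tb'
  else
    match PySem.List.pyGet? tb (-1) with -- tb[-1]
    | none => false                      -- unreachable: tb ≠ []
    | some last =>
      if PySem.Chars.isspace last then false
      else
        match PySem.List.pyGet? (PySem.Chars.split₀ tb) (-1) with  -- tb.split()[-1]
        | none => false                  -- unreachable: tb ends in a non-space char
        | some word =>
          match PySem.List.pyGet? word 0 with                      -- word[0]
          | none => false                -- unreachable: word ≠ []
          | some c0 =>
            c0 == '@' && !(PySem.Chars.isIn ['@'] (PySem.List.slice word (some 1) none))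

-- ===== PRECONDITION & SPEC =====
def Spec_should_trigger (text : String) (cursor_col : Int) (out : Bool) : Prop := out = should_trigger_alt text cursor_col
instance (text : String) (cursor_col : Int) (out : Bool) : Decidable (Spec_should_trigger text cursor_col out) := by unfold Spec_should_trigger; infer_instance

-- ===== CLAIM (what is proved, stated in full; the proofs are below) =====
def Claim_equal_should_trigger : Prop := ∀ (text : String) (cursor_col : Int), Dom_should_trigger text cursor_col → Spec_should_trigger text cursor_col (should_trigger text cursor_col)

-- ===== LEMMAS AND PROOFS =====

def pvNonsp (c : Char) : Bool := !PySem.Chars.isspace c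

-- A's backward index loop, rephrased on the reversed prefix list.
def pvLoopRev : List Char → Bool
  | [] => false
  | c :: r =>
    if c = '@' then (r.isEmpty || PySem.Chars.isspace (r.headD ' '))
    else if PySem.Chars.isspace c then false
    else pvLoopRev r

-- A's loop restricted to the space-free trailing run (in reversed order).
def pvFRun : List Char → Bool
  | [] => false
  | c :: t => if c = '@' then t.isEmpty else pvFRun t

-- maximal space-free suffix of a list of characters
def pvTrailing : List Char → List Char
  | [] => []
  | c :: rest => if pvNonsp c && rest.all pvNonsp then c :: rest else pvTrailing rest

theorem pvTrailing_all (l : List Char) (h : l.all pvNonsp = true) : pvTrailing l = l := by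
  cases l with
  | nil => rfl
  | cons c rest =>
    simp only [List.all_cons, Bool.and_eq_true] at h
    simp [pvTrailing, h.1, h.2]

theorem pvTrailing_append (xs : List Char) (c : Char) :
    pvTrailing (xs ++ [c]) = if pvNonsp c then pvTrailing xs ++ [c] else [] := by
  induction xs with
  | nil => by_cases hc : pvNonsp c <;> simp [pvTrailing, hc]
  | cons x xs ih =>
    simp only [List.cons_append, pvTrailing, List.all_append, List.all_cons, List.all_nil, ih]
    by_cases hc : pvNonsp c <;> by_cases hx : (pvNonsp x && xs.all pvNonsp) = true <;>
      simp_all <;> split_ifs <;> simp_all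

theorem pvTakeWhile_eq_trailing (r : List Char) :
    r.takeWhile pvNonsp = (pvTrailing r.reverse).reverse := by
  induction r with
  | nil => simp [pvTrailing]
  | cons c r ih =>
    simp only [List.takeWhile_cons, List.reverse_cons, pvTrailing_append]
    by_cases hc : pvNonsp c
    · simp [hc, ih]
    · simp [hc]

theorem pvFRun_eq (run : List Char) :
    pvFRun run = ((run.getLast? == some '@') && !(run.dropLast.contains '@')) := by
  induction run with
  | nil => rfl
  | cons c t ih =>
    cases t with
    | nil => simp [pvFRun]; by_cases hc : c = '@' <;> simp [hc]
    | cons d t' =>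
      by_cases hc : c = '@'
      · subst hc
        simp [pvFRun, List.getLast?_cons_cons, List.dropLast_cons₂]
      · rw [show pvFRun (c::d::t') = pvFRun (d::t') from by simp [pvFRun, hc], ih]
        simp [List.getLast?_cons_cons, List.dropLast_cons₂, Ne.symm hc]

theorem pvLoopRev_eq (r : List Char) : pvLoopRev r = pvFRun (r.takeWhile pvNonsp) := by
  induction r with
  | nil => rfl
  | cons c r ih =>
    by_cases hsp : PySem.Chars.isspace c
    · have hc : c ≠ '@' := by rintro rfl; revert hsp; decide
      simp [pvLoopRev, hc, hsp, pvNonsp, pvFRun]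
    · by_cases hc : c = '@'
      · subst hc
        simp only [pvLoopRev, List.takeWhile_cons]
        simp only [pvNonsp, hsp, Bool.not_false, if_pos, pvFRun]
        cases r with
        | nil => simp
        | cons d r' =>
          simp only [List.takeWhile_cons, pvNonsp, List.headD, List.isEmpty_cons,
            Bool.false_or, List.head?_cons, pvFRun]
          by_cases hd : PySem.Chars.isspace d <;> simp [hd]
      · simp [pvLoopRev, hc, hsp, pvNonsp, pvFRun, ih]

theorem pvTake_rev (tb : List Char) (i : Nat) (h : i < tb.length) :
    (tb.take (i + 1)).reverse = tb[i] :: (tb.take i).reverse := by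
  rw [List.take_succ]
  simp [List.getElem?_eq_getElem h]

theorem pvLoop_eq (tb : List Char) : ∀ i, i ≤ tb.length →
    should_trigger.loop tb i = pvLoopRev ((tb.take i).reverse) := by
  intro i
  induction i with
  | zero => intro _; rfl
  | succ j ihj =>
    intro h
    have hj : j < tb.length := by omega
    rw [pvTake_rev tb j hj]
    have hg : tb.getD j ' ' = tb[j] := List.getD_eq_getElem tb ' ' hj
    rw [should_trigger.loop, pvLoopRev, hg]
    by_cases hc : tb[j] = '@'
    · rw [if_pos hc, if_pos hc]
      cases j with
      | zero => simp
      | succ k =>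
        have hk : k < tb.length := by omega
        rw [pvTake_rev tb k hk]
        have hg2 : tb.getD (k + 1 - 1) ' ' = tb[k] := by
          simpa using List.getD_eq_getElem tb ' ' hk
        simp only [List.isEmpty_cons, Bool.false_or, List.headD_cons, hg2]
        split_ifs with h2 <;> simp_all
    · rw [if_neg hc, if_neg hc]
      by_cases hs : PySem.Chars.isspace tb[j]
      · simp [hs]
      · simp only [hs, Bool.false_eq_true, if_false]
        exact ihj (by omega)

theorem pvGo_acc (s : List Char) : ∀ (cur : List Char) (acc : List (List Char)),
    PySem.Chars.split₀.go s cur acc = acc.reverse ++ PySem.Chars.split₀.go s cur [] := by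
  induction s with
  | nil =>
    intro cur acc
    simp only [PySem.Chars.split₀.go]
    by_cases h : cur.isEmpty <;> simp [h]
  | cons c rest ih =>
    intro cur acc
    simp only [PySem.Chars.split₀.go]
    by_cases hs : PySem.Chars.isspace c
    · by_cases h : cur.isEmpty
      · simp only [hs, h, if_true]
        rw [ih [] acc]
      · simp only [hs, h, if_true, if_false, Bool.false_eq_true]
        rw [ih [] (cur.reverse :: acc), ih [] [cur.reverse]]
        simp
    · simp only [hs, Bool.false_eq_true, if_false]
      rw [ih (c :: cur) acc]

theorem pvGo_getLast (s : List Char) : ∀ (cur : List Char), s ≠ [] →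
    s.getLast?.all (fun c => pvNonsp c) = true →
    (PySem.Chars.split₀.go s cur []).getLast?
      = some (if s.all pvNonsp then cur.reverse ++ pvTrailing s else pvTrailing s) := by
  induction s with
  | nil => intro _ h; exact absurd rfl h
  | cons c rest ih =>
    intro cur _ hlast
    cases rest with
    | nil =>
      simp only [List.getLast?_singleton, Option.all_some] at hlast
      have hsp : PySem.Chars.isspace c = false := by
        simpa [pvNonsp] using hlast
      simp [PySem.Chars.split₀.go, hsp, pvTrailing, List.all_cons, hlast]
    | cons d rest' =>
      have hne : (d :: rest') ≠ [] := by simp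
      have hlast' : (d :: rest').getLast?.all (fun c => pvNonsp c) = true := by
        rwa [List.getLast?_cons_cons] at hlast
      by_cases hsp : PySem.Chars.isspace c
      · have hnsp : pvNonsp c = false := by simp [pvNonsp, hsp]
        have h0 := ih [] hne hlast'
        have hnonnil : PySem.Chars.split₀.go (d :: rest') [] [] ≠ [] := by
          intro h; rw [h] at h0; simp at h0
        have hval : (PySem.Chars.split₀.go (d :: rest') [] []).getLast?
            = some (pvTrailing (d :: rest')) := by
          rw [h0]; split_ifs <;> simp
        rw [PySem.Chars.split₀.go]
        simp only [hsp, if_true]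
        have hgoal : ∀ acc : List (List Char),
            (PySem.Chars.split₀.go (d :: rest') [] acc).getLast? = some (pvTrailing (d :: rest')) := by
          intro acc
          rw [pvGo_acc, List.getLast?_append_of_ne_nil _ hnonnil, hval]
        have hs_all : (c :: d :: rest').all pvNonsp = false := by simp [List.all_cons, hnsp]
        have htr : pvTrailing (c :: d :: rest') = pvTrailing (d :: rest') := by
          simp [pvTrailing, hnsp]
        rw [hs_all] at *; by_cases hcur : cur.isEmpty <;> simp [hcur, hgoal, htr]
      · have hnsp : pvNonsp c = true := by simp [pvNonsp, hsp]
        rw [PySem.Chars.split₀.go]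
        simp only [hsp, Bool.false_eq_true, if_false]
        rw [ih (c :: cur) hne hlast']
        by_cases hall : (d :: rest').all pvNonsp
        · have : (c :: d :: rest').all pvNonsp = true := by simp [List.all_cons, hnsp, hall]
          rw [if_pos hall, if_pos this]
          rw [pvTrailing_all _ hall]
          have : pvTrailing (c :: d :: rest') = c :: d :: rest' := by
            simp [pvTrailing, hnsp, hall]
          rw [this]; simp
        · have hall' : (d :: rest').all pvNonsp = false := by
            simpa using hall
          have h2 : (c :: d :: rest').all pvNonsp = false := by
            rw [List.all_cons, hall']; simp
          have htr : pvTrailing (c :: d :: rest') = pvTrailing (d :: rest') := by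
            simp [pvTrailing, hall']
          rw [hall', h2, htr]
          simp

theorem pvPyGet_neg_one {α : Type} (xs : List α) (h : xs ≠ []) :
    PySem.List.pyGet? xs (-1) = xs.getLast? := by
  have hl : 1 ≤ xs.length := by cases xs <;> simp_all
  simp [PySem.List.pyGet?, PySem.List.pyIdx?, hl, List.getLast?_eq_getElem?]

theorem pvPyGet_zero {α : Type} (xs : List α) (h : xs ≠ []) :
    PySem.List.pyGet? xs 0 = xs.head? := by
  have hl : 0 < xs.length := by cases xs <;> simp_all
  simp [PySem.List.pyGet?, PySem.List.pyIdx?, hl, List.head?_eq_getElem?]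

theorem pvIsIn_singleton (c : Char) (xs : List Char) :
    PySem.Chars.isIn [c] xs = xs.contains c := by
  by_cases h : c ∈ xs
  · rw [List.contains_eq_mem]
    simp only [decide_true, h]
    exact (PySem.Chars.isIn_iff_infix _ _).mpr ((List.singleton_infix_iff c xs).mpr h)
  · rw [List.contains_eq_mem]
    simp only [h, decide_false]
    rw [PySem.Chars.isIn_eq_false_iff _ _]
    rw [List.singleton_infix_iff]; exact h

-- the two function bodies agree on the sliced character list
theorem pvMain (tb : List Char) :
    should_trigger.loop tb tb.length =
      (if tb = [] then false
       else match PySem.List.pyGet? tb (-1) with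
       | none => false
       | some last =>
         if PySem.Chars.isspace last then false
         else match PySem.List.pyGet? (PySem.Chars.split₀ tb) (-1) with
         | none => false
         | some word =>
           match PySem.List.pyGet? word 0 with
           | none => false
           | some c0 =>
             c0 == '@' && !(PySem.Chars.isIn ['@'] (PySem.List.slice word (some 1) none))) := by
  by_cases htb : tb = []
  · subst htb; rfl
  · rw [if_neg htb, pvPyGet_neg_one tb htb]
    cases hrev : tb.reverse with
    | nil => exact absurd (by simpa using congrArg List.reverse hrev) htb
    | cons c r =>
      have hlast : tb.getLast? = some c := by
        rw [← List.head?_reverse, hrev, List.head?_cons]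
      have hA : should_trigger.loop tb tb.length = pvLoopRev (c :: r) := by
        rw [pvLoop_eq tb tb.length le_rfl, List.take_length, hrev]
      rw [hlast]
      by_cases hsp : PySem.Chars.isspace c
      · have hc : c ≠ '@' := by rintro rfl; revert hsp; decide
        rw [hA]
        simp [pvLoopRev, hc, hsp]
      · have hnsp : pvNonsp c = true := by simp [pvNonsp, hsp]
        simp only [hsp, Bool.false_eq_true, if_false]
        rw [hA, ← hrev, pvLoopRev_eq, pvTakeWhile_eq_trailing,
          List.reverse_reverse, pvFRun_eq]
        -- B's word is the maximal space-free suffix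
        have hlastAll : tb.getLast?.all (fun c => pvNonsp c) = true := by
          rw [hlast]; simpa using hnsp
        have hsplitLast : (PySem.Chars.split₀ tb).getLast? = some (pvTrailing tb) := by
          have h0 := pvGo_getLast tb [] htb hlastAll
          have : PySem.Chars.split₀ tb = PySem.Chars.split₀.go tb [] [] := rfl
          rw [this, h0]; split_ifs <;> simp
        have hsne : PySem.Chars.split₀ tb ≠ [] := by
          intro h; rw [h] at hsplitLast; simp at hsplitLast
        have htbdec : tb = r.reverse ++ [c] := by
          have := congrArg List.reverse hrev
          simpa using this
        have hwne : pvTrailing tb ≠ [] := by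
          rw [htbdec, pvTrailing_append, if_pos hnsp]
          simp
        cases hh : (pvTrailing tb).head? with
        | none => exact absurd (List.head?_eq_none_iff.mp hh) hwne
        | some c0 =>
          have hrc : (pvTrailing tb).tail.reverse.contains '@'
              = (pvTrailing tb).tail.contains '@' := by
            simp [List.contains_eq_mem]
          simp only [pvPyGet_neg_one _ hsne, hsplitLast, pvPyGet_zero _ hwne, hh,
            PySem.List.slice_from_one, pvIsIn_singleton, List.drop_one,
            List.getLast?_reverse, List.dropLast_reverse, hrc]
          simp

-- ===== VERDICT (by name: the statement is the Claim_ definition above) =====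
theorem should_trigger_spec : Claim_equal_should_trigger := by
  intro text cursor_col _
  unfold Spec_should_trigger should_trigger should_trigger_alt
  exact pvMain _
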